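-- pv_equiv track=rewrite | github.com/tsuru7/algorithm-study | AtCoder/ABC271/C-2.py | solve
-- ===== SOURCE A (Python) =====
-- from bisect import bisect_left, bisect_right
--
-- def judge(wj, a, n):
--     '''
--     重複を除いた持っている本のリスト a
--     wj 巻まで読めるか判定する
--     '''
--     read = bisect_right(a, wj) # 持っている本の中で読む冊数
--     sell = n - read # 読まない本は売れる
--     if wj - read <= sell//2: # 読みたい本のうち持っていない冊数が買える冊数以下か
--         return True
--     else:
--         return False
--
-- def solve(n,a):
--
--     seta = set(a)
--     ndup = n - len(seta)
--     a = list(seta)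
--     a.sort()
--
--     ac = 0
--     wa = n+1
--     while wa - ac > 1:
--         wj = (wa+ac)//2
--         if judge(wj, a, n):
--             ac = wj
--         else:
--             wa = wj
--
--     return ac
-- ===== SOURCE B (Python) =====
-- def solve(n, a):
--     # For each possible count r of owned distinct books that get read, the target
--     # volumes k with exactly r owned books <= k form one contiguous segment; within a
--     # segment, feasibility is k <= r + (n - r) // 2, so the best k there is a closed form.
--     arr = sorted(set(a))
--     m = len(arr)
--     ans = 0
--     for r in range(m + 1):
--         lo = arr[r - 1] if r > 0 else 1
--         hi = arr[r] - 1 if r < m else n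
--         lo = max(lo, 1)
--         hi = min(hi, n)
--         if lo > hi:
--             continue
--         k = min(hi, r + (n - r) // 2)
--         if k >= lo:
--             ans = max(ans, k)
--     return ans
-- ===== Notes on version B (the rewrite author's own statement) =====
-- stated objective: alternative
-- what changed: Replaces the binary search over the answer (with a bisect_right re-scan at every probe) by a single pass over the s+1 segments of target volumes on which the owned-book count is constant, taking a closed-form best feasible volume per segment and the maximum over segments.
import Mathlib
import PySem

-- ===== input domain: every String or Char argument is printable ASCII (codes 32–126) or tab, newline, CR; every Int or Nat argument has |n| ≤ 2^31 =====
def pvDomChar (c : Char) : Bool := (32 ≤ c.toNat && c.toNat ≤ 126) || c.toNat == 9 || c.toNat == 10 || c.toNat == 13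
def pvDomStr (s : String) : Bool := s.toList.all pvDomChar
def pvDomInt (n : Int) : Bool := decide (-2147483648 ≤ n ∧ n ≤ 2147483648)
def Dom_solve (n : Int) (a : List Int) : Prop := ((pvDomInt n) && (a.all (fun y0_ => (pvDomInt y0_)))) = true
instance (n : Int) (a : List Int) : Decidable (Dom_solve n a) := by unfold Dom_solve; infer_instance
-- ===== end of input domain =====

-- B replaces A's binary search over the answer by one pass over the segments of target
-- volumes with a constant owned-book count, taking a closed-form optimum per segment;
-- they agree because the feasibility predicate is monotone (proved below).

-- ===== PORT A =====
def judge (wj : Int) (a : List Int) (n : Int) : Bool :=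
  let read : Int := (PySem.List.bisectRight a wj : Int)
  let sell : Int := n - read
  if wj - read ≤ PySem.Int.floordiv sell 2 then true else false

def solveLoop (a : List Int) (n : Int) : Nat → Int → Int → Int
  | 0, ac, _wa => ac
  | fuel+1, ac, wa =>
    if 1 < wa - ac then
      let wj := PySem.Int.floordiv (wa + ac) 2
      if judge wj a n then solveLoop a n fuel wj wa
      else solveLoop a n fuel ac wj
    else ac

def solve (n : Int) (a : List Int) : Int :=
  let seta := PySem.Set.ofList a
  let _ndup := n - (seta.length : Int)
  let arr := PySem.List.sorted seta (fun x => x)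
  solveLoop arr n (n + 1).toNat 0 (n + 1)

-- ===== PORT B =====
-- one iteration of Source B's loop body (r ranges over range(m+1), so the getD indices are in range)
def altStep (arr : List Int) (n : Int) (ans : Int) (r : Nat) : Int :=
  let m := arr.length
  let lo0 : Int := if 0 < r then arr.getD (r - 1) 0 else 1
  let hi0 : Int := if r < m then arr.getD r 0 - 1 else n
  let lo := max lo0 1
  let hi := min hi0 n
  if lo > hi then ans
  else
    let k := min hi ((r : Int) + PySem.Int.floordiv (n - (r : Int)) 2)
    if lo ≤ k then max ans k else ans

def solve_alt (n : Int) (a : List Int) : Int :=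
  let arr := PySem.List.sorted (PySem.Set.ofList a) (fun x => x)
  (List.range (arr.length + 1)).foldl (altStep arr n) 0

-- ===== PRECONDITION & SPEC =====
def Spec_solve (n : Int) (a : List Int) (out : Int) : Prop := out = solve_alt n a
instance (n : Int) (a : List Int) (out : Int) : Decidable (Spec_solve n a out) := by unfold Spec_solve; infer_instance

-- ===== CLAIM (what is proved, stated in full; the proofs are below) =====
def Claim_equal_solve : Prop := ∀ (n : Int) (a : List Int), Dom_solve n a → Spec_solve n a (solve n a)

-- ===== LEMMAS AND PROOFS =====

-- judge as an inequality on the bisection point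
lemma judge_iff (k : Int) (arr : List Int) (n : Int) :
    judge k arr n = true ↔
      k - (PySem.List.bisectRight arr k : Int) ≤
        PySem.Int.floordiv (n - (PySem.List.bisectRight arr k : Int)) 2 := by
  simp [judge]

-- bisectRight is monotone in the probe
lemma br_mono (arr : List Int) (hs : arr.Pairwise (· ≤ ·)) (k : Int) :
    PySem.List.bisectRight arr k ≤ PySem.List.bisectRight arr (k + 1) := by
  by_contra h
  push_neg at h
  obtain ⟨hlen1, hle1, hgt1⟩ := PySem.List.bisectRight_spec arr k hs
  obtain ⟨hlen2, hle2, hgt2⟩ := PySem.List.bisectRight_spec arr (k + 1) hs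
  have hj : PySem.List.bisectRight arr (k + 1) < arr.length := lt_of_lt_of_le h hlen1
  have h1 := hle1 _ hj h
  have h2 := hgt2 _ hj le_rfl
  omega

-- on a strictly increasing list the bisection point moves by at most one
lemma br_step (arr : List Int) (hlt : arr.Pairwise (· < ·)) (k : Int) :
    PySem.List.bisectRight arr (k + 1) ≤ PySem.List.bisectRight arr k + 1 := by
  have hs : arr.Pairwise (· ≤ ·) := hlt.imp (fun h => le_of_lt h)
  by_contra h
  push_neg at h
  obtain ⟨hlen1, hle1, hgt1⟩ := PySem.List.bisectRight_spec arr k hs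
  obtain ⟨hlen2, hle2, hgt2⟩ := PySem.List.bisectRight_spec arr (k + 1) hs
  have hb1 : PySem.List.bisectRight arr k < arr.length := by omega
  have hb2 : PySem.List.bisectRight arr k + 1 < arr.length := by omega
  have h1 : arr[PySem.List.bisectRight arr k] ≤ k + 1 := hle2 _ hb1 (by omega)
  have h2 : arr[PySem.List.bisectRight arr k + 1] ≤ k + 1 := hle2 _ hb2 (by omega)
  have h3 : k < arr[PySem.List.bisectRight arr k] := hgt1 _ hb1 le_rfl
  have h4 : arr[PySem.List.bisectRight arr k] < arr[PySem.List.bisectRight arr k + 1] :=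
    List.pairwise_iff_getElem.mp hlt _ _ hb1 hb2 (by omega)
  omega

-- the feasibility predicate is monotone: once it fails it fails forever
lemma judge_mono (arr : List Int) (n : Int) (hlt : arr.Pairwise (· < ·)) (k : Int)
    (h : judge k arr n = false) : judge (k + 1) arr n = false := by
  have hs : arr.Pairwise (· ≤ ·) := hlt.imp (fun h => le_of_lt h)
  have h1 := br_mono arr hs k
  have h2 := br_step arr hlt k
  rw [← Bool.not_eq_true, judge_iff] at h ⊢
  rw [PySem.Int.floordiv_eq_ediv_of_pos (by norm_num)] at h ⊢
  omega

lemma judge_chain (arr : List Int) (n : Int) (hlt : arr.Pairwise (· < ·)) (j : Int)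
    (h : judge j arr n = false) : ∀ i, j ≤ i → judge i arr n = false := by
  intro i hi
  induction i, hi using Int.le_induction with
  | base => exact h
  | succ m _ ih => exact judge_mono arr n hlt m ih

-- the bisection point is determined by the usual bracketing
lemma br_eq_of (arr : List Int) (hs : arr.Pairwise (· ≤ ·)) (k : Int) (j : Nat)
    (hj : j ≤ arr.length)
    (hlow : ∀ i (_ : i < arr.length), i < j → arr[i] ≤ k)
    (hhigh : ∀ i (_ : i < arr.length), j ≤ i → k < arr[i]) :
    PySem.List.bisectRight arr k = j := by
  obtain ⟨hlen, hle, hgt⟩ := PySem.List.bisectRight_spec arr k hs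
  rcases lt_trichotomy (PySem.List.bisectRight arr k) j with h | h | h
  · have hb : PySem.List.bisectRight arr k < arr.length := by omega
    have := hlow _ hb h
    have := hgt _ hb le_rfl
    omega
  · exact h
  · have hb : j < arr.length := by omega
    have := hle _ hb h
    have := hhigh _ hb le_rfl
    omega

lemma getElem_mono (arr : List Int) (hs : arr.Pairwise (· ≤ ·)) (i j : Nat)
    (hij : i ≤ j) (hj : j < arr.length) : arr[i]'(by omega) ≤ arr[j] := by
  rcases Nat.lt_or_ge i j with h | h
  · exact List.pairwise_iff_getElem.mp hs _ _ (by omega) hj h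
  · have : i = j := by omega
    subst this; exact le_rfl

-- inside the r-th segment the bisection point is r
lemma seg_br (arr : List Int) (hs : arr.Pairwise (· ≤ ·)) (r : Nat) (hr : r ≤ arr.length)
    (k : Int)
    (hlo : ∀ (_ : 0 < r), arr.getD (r - 1) 0 ≤ k)
    (hhi : ∀ (h : r < arr.length), k < arr[r]) :
    PySem.List.bisectRight arr k = r := by
  apply br_eq_of arr hs k r hr
  · intro i hi hir
    have hr0 : 0 < r := by omega
    have hr1 : r - 1 < arr.length := by omega
    have := hlo hr0
    rw [List.getD_eq_getElem arr 0 hr1] at this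
    exact le_trans (getElem_mono arr hs i (r - 1) (by omega) hr1) this
  · intro i hi hri
    exact lt_of_lt_of_le (hhi (by omega)) (getElem_mono arr hs r i hri hi)

-- soundness invariant of B's fold: the accumulator is 0 or a feasible volume in [1, n]
def AltInv (arr : List Int) (n ans : Int) : Prop :=
  ans = 0 ∨ (1 ≤ ans ∧ ans ≤ n ∧ judge ans arr n = true)

lemma altStep_inv (arr : List Int) (n : Int) (hs : arr.Pairwise (· ≤ ·)) (ans : Int) (r : Nat)
    (hr : r ≤ arr.length) (h : AltInv arr n ans) : AltInv arr n (altStep arr n ans r) := by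
  unfold altStep
  by_cases hskip : max (if 0 < r then arr.getD (r - 1) 0 else 1) 1 > min (if r < arr.length then arr.getD r 0 - 1 else n) n
  · simp only [hskip, if_pos, gt_iff_lt]
    exact h
  · push_neg at hskip
    simp only [gt_iff_lt, if_neg (not_lt.mpr hskip)]
    set lo := max (if 0 < r then arr.getD (r - 1) 0 else 1) 1 with hlo
    set hi := min (if r < arr.length then arr.getD r 0 - 1 else n) n with hhi
    set k := min hi ((r : Int) + PySem.Int.floordiv (n - (r : Int)) 2) with hk
    by_cases hfeas : lo ≤ k
    · rw [if_pos hfeas]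
      have hk1 : 1 ≤ k := le_trans (le_max_right _ 1) hfeas
      have hkn : k ≤ n := le_trans (min_le_left _ _) (min_le_right _ _)
      have hbr : PySem.List.bisectRight arr k = r := by
        apply seg_br arr hs r hr k
        · intro h0
          have : (if 0 < r then arr.getD (r - 1) 0 else 1) ≤ lo := le_max_left _ _
          rw [if_pos h0] at this
          exact le_trans this hfeas
        · intro hrm
          have h1 : k ≤ hi := min_le_left _ _
          have h2 : hi ≤ arr.getD r 0 - 1 := by
            rw [hhi, if_pos hrm]; exact min_le_left _ _
          rw [List.getD_eq_getElem arr 0 hrm] at h2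
          omega
      have hjudge : judge k arr n = true := by
        rw [judge_iff, hbr]
        have : k ≤ (r : Int) + PySem.Int.floordiv (n - (r : Int)) 2 := min_le_right _ _
        omega
      rcases h with h | ⟨h1, h2, h3⟩
      · right
        rw [h, max_eq_right (by omega)]
        exact ⟨hk1, hkn, hjudge⟩
      · right
        rcases le_total ans k with hle | hle
        · rw [max_eq_right hle]; exact ⟨hk1, hkn, hjudge⟩
        · rw [max_eq_left hle]; exact ⟨h1, h2, h3⟩
    · rw [if_neg hfeas]; exact h

lemma altFold_inv (arr : List Int) (n : Int) (hs : arr.Pairwise (· ≤ ·)) :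
    ∀ (l : List Nat) (ans : Int), (∀ r ∈ l, r ≤ arr.length) → AltInv arr n ans →
      AltInv arr n (l.foldl (altStep arr n) ans) := by
  intro l
  induction l with
  | nil => intro ans _ h; exact h
  | cons r t ih =>
    intro ans hmem h
    exact ih _ (fun x hx => hmem x (List.mem_cons_of_mem r hx))
      (altStep_inv arr n hs ans r (hmem r (List.mem_cons_self)) h)

-- B's step never decreases the accumulator
lemma altStep_ge (arr : List Int) (n : Int) (ans : Int) (r : Nat) :
    ans ≤ altStep arr n ans r := by
  simp only [altStep]
  split_ifs <;> first | exact le_rfl | exact le_max_left _ _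

lemma altFold_ge (arr : List Int) (n : Int) :
    ∀ (l : List Nat) (ans : Int), ans ≤ l.foldl (altStep arr n) ans := by
  intro l
  induction l with
  | nil => intro ans; exact le_rfl
  | cons r t ih => intro ans; exact le_trans (altStep_ge arr n ans r) (ih _)

-- completeness: at r = bisectRight arr k, the step reaches any feasible volume k
lemma altStep_complete (arr : List Int) (n : Int) (hs : arr.Pairwise (· ≤ ·)) (k ans : Int)
    (hk1 : 1 ≤ k) (hkn : k ≤ n) (hjudge : judge k arr n = true) :
    k ≤ altStep arr n ans (PySem.List.bisectRight arr k) := by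
  obtain ⟨hlen, hle, hgt⟩ := PySem.List.bisectRight_spec arr k hs
  set r := PySem.List.bisectRight arr k with hr
  have hlo : max (if 0 < r then arr.getD (r - 1) 0 else 1) 1 ≤ k := by
    rcases Nat.eq_zero_or_pos r with h0 | h0
    · rw [h0]; simp; omega
    · rw [if_pos h0]
      have hr1 : r - 1 < arr.length := by omega
      have := hle (r - 1) hr1 (by omega)
      rw [List.getD_eq_getElem arr 0 hr1]
      omega
  have hhi : k ≤ min (if r < arr.length then arr.getD r 0 - 1 else n) n := by
    rcases Nat.lt_or_ge r arr.length with hm | hm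
    · rw [if_pos hm, List.getD_eq_getElem arr 0 hm]
      have := hgt r hm le_rfl
      omega
    · rw [if_neg (by omega)]; omega
  have hcap : k ≤ (r : Int) + PySem.Int.floordiv (n - (r : Int)) 2 := by
    rw [judge_iff] at hjudge
    rw [← hr] at hjudge
    omega
  simp only [altStep]
  have hns : ¬ (max (if 0 < r then arr.getD (r - 1) 0 else 1) 1 >
      min (if r < arr.length then arr.getD r 0 - 1 else n) n) := by omega
  rw [if_neg hns, if_pos (by omega)]
  exact le_trans (le_min hhi hcap) (le_max_right _ _)

lemma altFold_complete (arr : List Int) (n : Int) (hs : arr.Pairwise (· ≤ ·)) (k : Int)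
    (hk1 : 1 ≤ k) (hkn : k ≤ n) (hjudge : judge k arr n = true)
    (l : List Nat) (hmem : PySem.List.bisectRight arr k ∈ l) (ans : Int) :
    k ≤ l.foldl (altStep arr n) ans := by
  obtain ⟨s, t, hst⟩ := List.append_of_mem hmem
  subst hst
  rw [List.foldl_append, List.foldl_cons]
  exact le_trans (altStep_complete arr n hs k _ hk1 hkn hjudge) (altFold_ge arr n t _)

-- when the loop does not run, A returns ac
lemma solveLoop_stop (arr : List Int) (n : Int) (fuel : Nat) (ac wa : Int)
    (h : ¬ 1 < wa - ac) : solveLoop arr n fuel ac wa = ac := by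
  cases fuel with
  | zero => rfl
  | succ fuel => simp [solveLoop, h]

-- A's binary search converges to any R with the right bracketing properties
lemma bsearch_eq (arr : List Int) (n : Int) (R : Int)
    (hL : ∀ j, 1 ≤ j → j ≤ R → judge j arr n = true)
    (hU : ∀ j, R < j → j ≤ n → judge j arr n = false) :
    ∀ fuel (ac wa : Int), ac < wa → (wa - ac).toNat ≤ fuel → 0 ≤ ac → wa ≤ n + 1 →
      ac ≤ R → R < wa → solveLoop arr n fuel ac wa = R := by
  intro fuel
  induction fuel with
  | zero => intro ac wa h1 h2 _ _ _ _; omega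
  | succ fuel ih =>
    intro ac wa h1 h2 h3 h4 h5 h6
    by_cases hgap : 1 < wa - ac
    · have hmid : ac < PySem.Int.floordiv (wa + ac) 2 ∧ PySem.Int.floordiv (wa + ac) 2 < wa := by
        rw [PySem.Int.floordiv_eq_ediv_of_pos (by norm_num)]
        omega
      set wj := PySem.Int.floordiv (wa + ac) 2 with hwj
      have hwj2 : wj ≤ wa - 1 := by omega
      simp only [solveLoop, if_pos hgap, ← hwj]
      cases hj : judge wj arr n with
      | true =>
        have hjR : wj ≤ R := by
          by_contra hc
          push_neg at hc
          have := hU wj hc (by omega)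
          rw [hj] at this
          exact absurd this (by simp)
        rw [if_pos rfl]
        exact ih wj wa hmid.2 (by omega) (by omega) h4 hjR h6
      | false =>
        have hjR : R < wj := by
          by_contra hc
          push_neg at hc
          have := hL wj (by omega) hc
          rw [hj] at this
          exact absurd this (by simp)
        rw [if_neg (by simp)]
        exact ih ac wj hmid.1 (by omega) h3 (by omega) h5 hjR
    · have : R = ac := by omega
      rw [solveLoop_stop arr n _ ac wa hgap, this]

-- ===== VERDICT (by name: the statement is the Claim_ definition above) =====
theorem solve_spec : Claim_equal_solve := by
  intro n a _hdom
  unfold Spec_solve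
  set arr := PySem.List.sorted (PySem.Set.ofList a) (fun x => x) with harr
  have hlt : arr.Pairwise (· < ·) := PySem.List.sorted_ofList_pairwise_lt a
  have hs : arr.Pairwise (· ≤ ·) := hlt.imp (fun h => le_of_lt h)
  have hA : solve n a = solveLoop arr n (n + 1).toNat 0 (n + 1) := by
    simp only [solve, harr]
  have hB : solve_alt n a = (List.range (arr.length + 1)).foldl (altStep arr n) 0 := by
    simp only [solve_alt, harr]
  set R := (List.range (arr.length + 1)).foldl (altStep arr n) 0 with hR
  have hinv : AltInv arr n R :=
    altFold_inv arr n hs _ 0 (fun r hr => by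
      have := List.mem_range.mp hr; omega) (Or.inl rfl)
  by_cases hn : n ≤ 0
  · have hR0 : R = 0 := by
      rcases hinv with h | ⟨h1, h2, _⟩
      · exact h
      · omega
    rw [hA, hB, hR0, solveLoop_stop arr n _ 0 (n + 1) (by omega)]
  · push_neg at hn
    have hU : ∀ j, R < j → j ≤ n → judge j arr n = false := by
      intro j hRj hjn
      cases hx : judge j arr n with
      | false => rfl
      | true =>
        have hj1 : 1 ≤ j := by
          rcases hinv with h | ⟨h1, _, _⟩ <;> omega
        have hmem : PySem.List.bisectRight arr j ∈ List.range (arr.length + 1) := by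
          rw [List.mem_range]
          have := (PySem.List.bisectRight_spec arr j hs).1
          omega
        have := altFold_complete arr n hs j hj1 hjn hx _ hmem 0
        omega
    have hL : ∀ j, 1 ≤ j → j ≤ R → judge j arr n = true := by
      intro j hj1 hjR
      by_contra hc
      have hcf : judge j arr n = false := by
        cases hx : judge j arr n
        · rfl
        · exact absurd hx hc
      have hRf : judge R arr n = false := judge_chain arr n hlt j hcf R hjR
      rcases hinv with h | ⟨_, _, h3⟩
      · omega
      · rw [h3] at hRf; exact absurd hRf (by simp)
    have hRn : 0 ≤ R ∧ R ≤ n := by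
      rcases hinv with h | ⟨h1, h2, _⟩ <;> omega
    rw [hA, hB]
    exact bsearch_eq arr n R hL hU (n + 1).toNat 0 (n + 1) (by omega) (by omega)
      le_rfl le_rfl hRn.1 (by omega)
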